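-- pv_equiv track=rewrite | github.com/jms7446/hackerrank | programmers/p12983.py | solution
-- ===== SOURCE A (Python) =====
-- from collections import defaultdict
--
-- def str_findall(ptn, s):
--     idx = s.find(ptn)
--     while idx != -1:
--         yield idx
--         idx = s.find(ptn, idx + 1)
--
-- def solution(strs, t):
--     match_map = defaultdict(list)
--     for s in strs:
--         for start in str_findall(s, t):
--             match_map[start].append(start + len(s))
--
--     memory = [None] * len(t)
--
--     def loop(idx):
--         if idx == len(t):
--             return 0
--         if memory[idx] is not None:
--             return memory[idx]
--
--         res = -1
--         if idx in match_map:
--             counts = [loop(end) for end in match_map[idx]]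
--             valid_counts = [c for c in counts if c >= 0]
--             if valid_counts:
--                 res = 1 + min(valid_counts)
--             else:
--                 res = -1
--         else:
--             res = -1
--
--         memory[idx] = res
--         return res
--     return loop(0)
-- ===== SOURCE B (Python) =====
-- def solution(strs, t):
--     # Bottom-up tabulation: dp[i] = min number of substrings tiling t[i:], -1 if impossible.
--     n = len(t)
--     dp = [-1] * (n + 1)
--     dp[n] = 0
--     for i in range(n - 1, -1, -1):
--         best = -1
--         for s in strs:
--             j = i + len(s)
--             if j <= n and t[i:j] == s and dp[j] >= 0:
--                 if best < 0 or dp[j] + 1 < best: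
--                     best = dp[j] + 1
--         dp[i] = best
--     return dp[0]
-- ===== Notes on version B (the rewrite author's own statement) =====
-- stated objective: alternative
-- what changed: Replaces the memoized top-down recursion over a precomputed occurrence map with an iterative bottom-up DP table filled right-to-left, checking substring matches directly.
import Mathlib
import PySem

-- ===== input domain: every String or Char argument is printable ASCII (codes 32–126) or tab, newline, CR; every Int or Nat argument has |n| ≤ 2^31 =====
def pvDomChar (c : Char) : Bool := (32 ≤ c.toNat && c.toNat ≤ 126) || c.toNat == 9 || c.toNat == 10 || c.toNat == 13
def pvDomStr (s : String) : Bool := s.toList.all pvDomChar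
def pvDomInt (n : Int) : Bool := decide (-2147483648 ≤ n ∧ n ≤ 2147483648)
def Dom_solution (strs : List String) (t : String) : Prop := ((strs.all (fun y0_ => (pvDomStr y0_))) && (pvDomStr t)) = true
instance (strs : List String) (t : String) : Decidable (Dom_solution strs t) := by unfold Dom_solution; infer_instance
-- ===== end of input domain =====

-- B replaces A's memoized top-down recursion over a precomputed occurrence map with an
-- iterative bottom-up DP table filled right-to-left that checks substring matches directly
-- (objective: alternative). A's recursion is ported without its memo cache: the cache only
-- speeds the pure recursion up, it never changes the returned value.

-- ===== PORT A =====
-- str_findall: the loop 'idx = s.find(ptn); while idx != -1: yield idx; idx = s.find(ptn, idx+1)'.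
-- The fuel (s.length + 1) only totalizes the loop: found indices strictly increase and stay ≤ len(s).
def sfGo (ptn s : List Char) : Nat → Int → List Int
  | 0, _ => []
  | fuel + 1, idx =>
    if idx = -1 then []
    else idx :: sfGo ptn s fuel (PySem.Chars.findFrom s ptn (idx + 1) none)

def strFindall (ptn s : List Char) : List Int :=
  sfGo ptn s (s.length + 1) (PySem.Chars.find s ptn)

-- match_map = defaultdict(list); for s in strs: for start in str_findall(s, t): match_map[start].append(start + len(s))
def buildMap (strsL : List (List Char)) (T : List Char) : PySem.Dict Int (List Int) :=
  strsL.foldl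
    (fun m s =>
      (strFindall s T).foldl
        (fun m start => m.modify start [] (fun l => l ++ [start + (s.length : Int)])) m)
    PySem.Dict.empty

-- loop(idx), without the memo cache; the fuel (n + 1) only totalizes the recursion
def loopA (mm : PySem.Dict Int (List Int)) (n : Int) : Nat → Int → Int
  | 0, _ => -1
  | fuel + 1, idx =>
    if idx = n then 0
    else if mm.contains idx then
      let counts := (mm.getD idx []).map (loopA mm n fuel)
      let valid := counts.filter (fun c => decide (0 ≤ c))
      match PySem.List.min? valid (fun c => c) with
      | some m => 1 + m
      | none => -1
    else -1

def solution (strs : List String) (t : String) : Int :=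
  loopA (buildMap (strs.map String.toList) t.toList) (t.toList.length : Int)
    (t.toList.length + 1) 0

-- ===== PORT B =====
def solution_alt (strs : List String) (t : String) : Int :=
  let T := t.toList
  let n : Int := (T.length : Int)
  let dp0 := PySem.List.pySetD (List.replicate (T.length + 1) (-1 : Int)) n 0
  let dp :=
    (PySem.List.pyRange (n - 1) (-1) (-1)).foldl
      (fun dp i =>
        let best :=
          strs.foldl
            (fun best s =>
              let j : Int := i + (s.toList.length : Int)
              if j ≤ n ∧ PySem.List.slice T (some i) (some j) = s.toList ∧
                  0 ≤ PySem.List.pyGetD dp j (-1) then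
                if best < 0 ∨ PySem.List.pyGetD dp j (-1) + 1 < best then
                  PySem.List.pyGetD dp j (-1) + 1
                else best
              else best)
            (-1 : Int)
        PySem.List.pySetD dp i best)
      dp0
  PySem.List.pyGetD dp 0 (-1)

-- ===== PRECONDITION & SPEC =====
-- Pre_ excludes only the inputs where '' ∈ strs while t is nonempty: there A's recursion
-- hits the self-loop idx → idx and raises RecursionError (it returns no value there;
-- B's iterative table terminates on those inputs and returns the answer that ignores '').
def Pre_solution (strs : List String) (t : String) : Prop := "" ∈ strs → t = ""
instance (strs : List String) (t : String) : Decidable (Pre_solution strs t) := by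
  unfold Pre_solution; infer_instance

def pvWitness_solution : List String × String := (["ab", "c"], "abc")

def Spec_solution (strs : List String) (t : String) (out : Int) : Prop := out = solution_alt strs t
instance (strs : List String) (t : String) (out : Int) : Decidable (Spec_solution strs t out) := by
  unfold Spec_solution; infer_instance

-- ===== CLAIM (what is proved, stated in full; the proofs are below) =====
def Claim_equal_solution : Prop := ∀ (strs : List String) (t : String), Dom_solution strs t → Pre_solution strs t → Spec_solution strs t (solution strs t)

-- ===== LEMMAS AND PROOFS =====

-- proof-only abstractions: the recorded ends per start, loopA with the dict abstracted to a
-- lookup function, its value at the canonical fuel, and one named DP step of port B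
def endsAll (strsL : List (List Char)) (T : List Char) (i : Int) : List Int :=
  strsL.filterMap
    (fun s => if 0 ≤ i ∧ s <+: T.drop i.toNat then some (i + (s.length : Int)) else none)

def loopE (E : Int → List Int) (n : Int) : Nat → Int → Int
  | 0, _ => -1
  | fuel + 1, idx =>
    if idx = n then 0
    else
      match PySem.List.min?
          (((E idx).map (loopE E n fuel)).filter (fun c => decide (0 ≤ c)))
          (fun c => c) with
      | some m => 1 + m
      | none => -1

def VE (E : Int → List Int) (n : Int) (e : Int) : Int := loopE E n ((n - e).toNat + 1) e

def bstep (strs : List String) (T : List Char) (dp : List Int) (i : Int) : List Int :=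
  PySem.List.pySetD dp i
    (strs.foldl
      (fun best s =>
        let j : Int := i + (s.toList.length : Int)
        if j ≤ (T.length : Int) ∧ PySem.List.slice T (some i) (some j) = s.toList ∧
            0 ≤ PySem.List.pyGetD dp j (-1) then
          if best < 0 ∨ PySem.List.pyGetD dp j (-1) + 1 < best then
            PySem.List.pyGetD dp j (-1) + 1
          else best
        else best)
      (-1 : Int))

lemma sfGo_eq (ptn s : List Char) (hp : ptn ≠ []) :
    ∀ (fuel k : Nat), k ≤ s.length → s.length + 1 - k ≤ fuel →
      sfGo ptn s fuel (PySem.Chars.findFrom s ptn (k : Int) none)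
        = ((List.range' k (s.length + 1 - k)).filter
            (fun i => decide (ptn <+: s.drop i))).map (fun i => Int.ofNat i) := by
  intro fuel
  induction fuel with
  | zero => intro k hk hf; omega
  | succ f ih =>
    intro k hk hf
    by_cases hneg : PySem.Chars.findFrom s ptn (k : Int) none = -1
    · -- no occurrence at or after k
      have hno : ∀ i, k ≤ i → ¬ ptn <+: s.drop i := by
        intro i hi hpre
        have hdd : (s.drop k).drop (i - k) = s.drop i := by
          rw [List.drop_drop]
          congr 1
          omega
        have hinf : PySem.Chars.isIn ptn (s.drop k) = true := by
          rw [← PySem.Chars.exists_prefix_drop_iff_isIn]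
          exact ⟨i - k, by rwa [hdd]⟩
        rw [PySem.Chars.isIn_iff_infix] at hinf
        exact (PySem.Chars.findFrom_natCast_eq_neg_one_iff s ptn k hk).mp hneg hinf
      have hfilter : ((List.range' k (s.length + 1 - k)).filter
            (fun i => decide (ptn <+: s.drop i))) = [] := by
        rw [List.filter_eq_nil_iff]
        intro i hi
        simp only [List.mem_range'_1] at hi
        simpa using hno i hi.1
      rw [hfilter]
      simp [sfGo, hneg]
    · obtain ⟨hge, hpre, hmin⟩ := PySem.Chars.findFrom_natCast_spec s ptn k hk hneg
      set r := PySem.Chars.findFrom s ptn (k : Int) none with hr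
      have hr0 : 0 ≤ r := le_trans (by positivity) hge
      set m := r.toNat with hm
      have hrm : r = (m : Int) := by omega
      have hkm : k ≤ m := by omega
      have hmlen : m + ptn.length ≤ s.length := by
        have := hpre.length_le
        simp only [List.length_drop] at this
        by_cases hms : m ≤ s.length
        · omega
        · exfalso
          have : s.drop m = [] := List.drop_eq_nil_of_le (by omega)
          rw [this] at hpre
          exact hp (List.prefix_nil.mp hpre)
      have hplen : 1 ≤ ptn.length := List.length_pos_iff.mpr hp
      -- unfold one step
      have hstep : sfGo ptn s (f + 1) r
          = r :: sfGo ptn s f (PySem.Chars.findFrom s ptn (r + 1) none) := by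
        simp [sfGo, hneg]
      rw [hstep]
      have hcast : r + 1 = ((m + 1 : Nat) : Int) := by omega
      rw [hcast, ih (m + 1) (by omega) (by omega)]
      have e4 : s.length + 1 - (m + 1) = s.length - m := by omega
      rw [e4]
      have h1 : List.range' k ((m - k) + ((s.length - m) + 1))
          = List.range' k (m - k) ++ List.range' (k + 1 * (m - k)) ((s.length - m) + 1) :=
        List.range'_append.symm
      have hsplit : List.range' k (s.length + 1 - k)
          = List.range' k (m - k) ++ m :: List.range' (m + 1) (s.length - m) := by
        rw [show s.length + 1 - k = (m - k) + ((s.length - m) + 1) from by omega, h1,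
          show k + 1 * (m - k) = m from by omega, List.range'_succ]
      rw [hsplit]
      have hfilter1 : (List.range' k (m - k)).filter (fun i => decide (ptn <+: s.drop i)) = [] := by
        rw [List.filter_eq_nil_iff]
        intro i hi
        simp only [List.mem_range'_1] at hi
        simpa using hmin i hi.1 (by omega)
      rw [List.filter_append, hfilter1, List.nil_append,
        List.filter_cons_of_pos (by simpa using hpre)]
      simp [hrm, Int.ofNat_eq_natCast]


lemma strFindall_eq (ptn s : List Char) (hp : ptn ≠ []) :
    strFindall ptn s
      = ((List.range (s.length + 1)).filter
          (fun i => decide (ptn <+: s.drop i))).map (fun i => Int.ofNat i) := by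
  have h0 := sfGo_eq ptn s hp (s.length + 1) 0 (by omega) (by omega)
  simp only [Nat.cast_zero, PySem.Chars.findFrom_zero, Nat.sub_zero] at h0
  rw [strFindall, h0, List.range_eq_range']

lemma mem_strFindall (ptn s : List Char) (hp : ptn ≠ []) (i : Int) :
    i ∈ strFindall ptn s ↔ 0 ≤ i ∧ ptn <+: s.drop i.toNat := by
  rw [strFindall_eq ptn s hp]
  constructor
  · intro h
    simp only [List.mem_map, List.mem_filter, List.mem_range, decide_eq_true_eq] at h
    obtain ⟨k, ⟨_, hpre⟩, rfl⟩ := h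
    exact ⟨by simp [Int.ofNat_eq_natCast], by simpa using hpre⟩
  · rintro ⟨h0, hpre⟩
    have hlen : i.toNat + ptn.length ≤ s.length := by
      have := hpre.length_le
      simp only [List.length_drop] at this
      by_cases hms : i.toNat ≤ s.length
      · omega
      · exfalso
        have hnil : s.drop i.toNat = [] := List.drop_eq_nil_of_le (by omega)
        rw [hnil] at hpre
        exact hp (List.prefix_nil.mp hpre)
    have hplen : 1 ≤ ptn.length := List.length_pos_iff.mpr hp
    simp only [List.mem_map, List.mem_filter, List.mem_range, decide_eq_true_eq]
    exact ⟨i.toNat, ⟨by omega, hpre⟩, by simp [Int.ofNat_eq_natCast]; omega⟩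

lemma nodup_strFindall (ptn s : List Char) (hp : ptn ≠ []) :
    (strFindall ptn s).Nodup := by
  rw [strFindall_eq ptn s hp]
  exact ((List.nodup_range.filter _).map (fun a b h => by simpa [Int.ofNat_eq_natCast] using h))



lemma inner_getD (s T : List Char) (hs : s ≠ []) (d : PySem.Dict Int (List Int)) (i : Int) :
    ((strFindall s T).foldl
        (fun m start => m.modify start [] (fun l => l ++ [start + (s.length : Int)])) d).getD i []
      = d.getD i [] ++ (if 0 ≤ i ∧ s <+: T.drop i.toNat then [i + (s.length : Int)] else []) := by
  have hmap : (strFindall s T).foldl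
        (fun m start => m.modify start [] (fun l => l ++ [start + (s.length : Int)])) d
      = ((strFindall s T).map (fun st => (st, st + (s.length : Int)))).foldl
        (fun m p => m.modify p.1 [] (fun l => l ++ [p.2])) d := by
    rw [List.foldl_map]
  rw [hmap, PySem.Dict.getD_foldl_modify_append]
  congr 1
  rw [List.filter_map]
  have hfe : ((strFindall s T).filter ((fun p => p.1 == i) ∘ (fun st => (st, st + (s.length : Int)))))
      = (strFindall s T).filter (fun st => decide (st = i)) := by
    apply List.filter_congr
    intro x _
    exact beq_eq_decide x i
  rw [hfe, List.filter_eq]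
  by_cases hmem : i ∈ strFindall s T
  · rw [List.count_eq_one_of_mem (nodup_strFindall s T hs) hmem]
    have := (mem_strFindall s T hs i).mp hmem
    simp [this]
  · rw [List.count_eq_zero_of_not_mem hmem]
    have : ¬ (0 ≤ i ∧ s <+: T.drop i.toNat) := fun h => hmem ((mem_strFindall s T hs i).mpr h)
    simp [this]

lemma buildMap_getD_aux (T : List Char) :
    ∀ (strsL : List (List Char)) (d : PySem.Dict Int (List Int)),
      (∀ s ∈ strsL, s ≠ []) → ∀ i,
      (strsL.foldl
        (fun m s =>
          (strFindall s T).foldl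
            (fun m start => m.modify start [] (fun l => l ++ [start + (s.length : Int)])) m)
        d).getD i []
        = d.getD i [] ++ endsAll strsL T i := by
  intro strsL
  induction strsL with
  | nil => intro d _ i; simp [endsAll]
  | cons s rest ih =>
    intro d h i
    rw [List.foldl_cons, ih _ (fun x hx => h x (List.mem_cons_of_mem _ hx)) i,
      inner_getD s T (h s List.mem_cons_self) d i]
    simp only [endsAll, List.filterMap_cons]
    by_cases hc : 0 ≤ i ∧ s <+: T.drop i.toNat
    · simp [hc]
    · simp [hc]

lemma buildMap_getD (strsL : List (List Char)) (T : List Char)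
    (h : ∀ s ∈ strsL, s ≠ []) (i : Int) :
    (buildMap strsL T).getD i [] = endsAll strsL T i := by
  rw [buildMap, buildMap_getD_aux T strsL PySem.Dict.empty h i]
  simp [PySem.Dict.getD_empty]

lemma buildMap_not_contains (strsL : List (List Char)) (T : List Char)
    (h : ∀ s ∈ strsL, s ≠ []) (i : Int)
    (hc : (buildMap strsL T).contains i = false) : endsAll strsL T i = [] := by
  rw [← buildMap_getD strsL T h i]
  exact PySem.Dict.getD_of_not_contains _ _ hc



lemma loopA_eq_loopE (strsL : List (List Char)) (T : List Char)
    (h : ∀ s ∈ strsL, s ≠ []) :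
    ∀ (fuel : Nat) (idx : Int),
      loopA (buildMap strsL T) (T.length : Int) fuel idx
        = loopE (endsAll strsL T) (T.length : Int) fuel idx := by
  intro fuel
  induction fuel with
  | zero => intro idx; rfl
  | succ f ih =>
    intro idx
    simp only [loopA, loopE]
    by_cases hn : idx = (T.length : Int)
    · simp [hn]
    · simp only [hn, if_false]
      by_cases hc : (buildMap strsL T).contains idx
      · rw [if_pos hc, buildMap_getD strsL T h idx]
        simp only [List.map_congr_left (fun e _ => ih e)]
      · rw [if_neg (by simp [hc]), buildMap_not_contains strsL T h idx (by simpa using hc)]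
        simp [PySem.List.min?]

lemma endsAll_bounds (strsL : List (List Char)) (T : List Char)
    (h : ∀ s ∈ strsL, s ≠ []) (i e : Int) (he : e ∈ endsAll strsL T i) :
    i < e ∧ e ≤ (T.length : Int) := by
  simp only [endsAll, List.mem_filterMap] at he
  obtain ⟨s, hsmem, hsome⟩ := he
  by_cases hc : 0 ≤ i ∧ s <+: T.drop i.toNat
  · rw [if_pos hc] at hsome
    obtain ⟨h0, hpre⟩ := hc
    obtain rfl : i + (s.length : Int) = e := by simpa using hsome
    have hs := h s hsmem
    have hplen : 1 ≤ s.length := List.length_pos_iff.mpr hs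
    have hlen : i.toNat + s.length ≤ T.length := by
      have := hpre.length_le
      simp only [List.length_drop] at this
      by_cases hms : i.toNat ≤ T.length
      · omega
      · exfalso
        have hnil : T.drop i.toNat = [] := List.drop_eq_nil_of_le (by omega)
        rw [hnil] at hpre
        exact hs (List.prefix_nil.mp hpre)
    omega
  · rw [if_neg hc] at hsome
    exact absurd hsome (by simp)

lemma loopE_fuel (E : Int → List Int) (n : Int)
    (hE : ∀ i e, e ∈ E i → i < e ∧ e ≤ n) :
    ∀ (f₁ : Nat) (f₂ : Nat) (idx : Int), (n - idx).toNat < f₁ → (n - idx).toNat < f₂ →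
      loopE E n f₁ idx = loopE E n f₂ idx := by
  intro f₁
  induction f₁ with
  | zero => intro f₂ idx h1 _; omega
  | succ g ih =>
    intro f₂ idx h1 h2
    match f₂, h2 with
    | h + 1, _ =>
      simp only [loopE]
      by_cases hn : idx = n
      · simp [hn]
      · simp only [hn, if_false]
        have hmap : (E idx).map (loopE E n g) = (E idx).map (loopE E n h) := by
          apply List.map_congr_left
          intro e hem
          obtain ⟨hlt, hle⟩ := hE idx e hem
          exact ih h e (by omega) (by omega)
        rw [hmap]

lemma bestFold_aux (rest : List Int) :
    ∀ (c : Int), 0 ≤ c → (∀ v ∈ rest, 0 ≤ v) →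
      rest.foldl (fun b v => if b < 0 ∨ v + 1 < b then v + 1 else b) (1 + c)
        = 1 + rest.foldl min c := by
  induction rest with
  | nil => intro c _ _; rfl
  | cons v rest ih =>
    intro c hc hall
    have hv : 0 ≤ v := hall v List.mem_cons_self
    have hstep : (if 1 + c < 0 ∨ v + 1 < 1 + c then v + 1 else 1 + c) = 1 + min c v := by
      rcases le_or_gt c v with hcv | hcv
      · rw [min_eq_left hcv]; split_ifs <;> omega
      · rw [min_eq_right (le_of_lt hcv)]; split_ifs <;> omega
    simp only [List.foldl_cons, hstep]
    exact ih (min c v) (le_min hc hv) (fun w hw => hall w (List.mem_cons_of_mem _ hw))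

lemma bestFold_eq_min (vs : List Int) (hv : ∀ v ∈ vs, 0 ≤ v) :
    vs.foldl (fun b v => if b < 0 ∨ v + 1 < b then v + 1 else b) (-1)
      = match PySem.List.min? vs (fun c => c) with
        | some m => 1 + m
        | none => (-1 : Int) := by
  cases vs with
  | nil => rfl
  | cons c rest =>
    rw [PySem.List.min?_id_cons]
    have hc : 0 ≤ c := hv c List.mem_cons_self
    have hfirst : (if (-1 : Int) < 0 ∨ c + 1 < -1 then c + 1 else -1) = 1 + c := by
      split_ifs <;> omega
    simp only [List.foldl_cons, hfirst]
    exact bestFold_aux rest c hc (fun w hw => hv w (List.mem_cons_of_mem _ hw))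





lemma solution_alt_eq (strs : List String) (t : String) :
    solution_alt strs t
      = PySem.List.pyGetD
          ((PySem.List.pyRange ((t.toList.length : Int) - 1) (-1) (-1)).foldl
            (bstep strs t.toList)
            (PySem.List.pySetD (List.replicate (t.toList.length + 1) (-1 : Int))
              (t.toList.length : Int) 0))
          0 (-1) := rfl

lemma best_eq (strs : List String) (T : List Char) (h : ∀ s ∈ strs, s.toList ≠ [])
    (dp : List Int) (ki : Nat) (hki : ki < T.length)
    (hdp : ∀ k : Nat, ki < k → k ≤ T.length →
      PySem.List.pyGetD dp ((k : Nat) : Int) (-1)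
        = VE (endsAll (strs.map String.toList) T) ((T.length : Nat) : Int) ((k : Nat) : Int)) :
    strs.foldl
      (fun best s =>
        let j : Int := ((ki : Nat) : Int) + (s.toList.length : Int)
        if j ≤ (T.length : Int) ∧
            PySem.List.slice T (some ((ki : Nat) : Int)) (some j) = s.toList ∧
            0 ≤ PySem.List.pyGetD dp j (-1) then
          if best < 0 ∨ PySem.List.pyGetD dp j (-1) + 1 < best then
            PySem.List.pyGetD dp j (-1) + 1
          else best
        else best)
      (-1 : Int)
      = VE (endsAll (strs.map String.toList) T) ((T.length : Nat) : Int) ((ki : Nat) : Int) := by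
  set E := endsAll (strs.map String.toList) T with hE
  set n : Int := ((T.length : Nat) : Int) with hn
  -- step 1: replace the body by a prefix-test form
  have h1 : strs.foldl
      (fun best s =>
        let j : Int := ((ki : Nat) : Int) + (s.toList.length : Int)
        if j ≤ (T.length : Int) ∧
            PySem.List.slice T (some ((ki : Nat) : Int)) (some j) = s.toList ∧
            0 ≤ PySem.List.pyGetD dp j (-1) then
          if best < 0 ∨ PySem.List.pyGetD dp j (-1) + 1 < best then
            PySem.List.pyGetD dp j (-1) + 1
          else best
        else best)
      (-1 : Int)
      = strs.foldl
      (fun best s =>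
        if s.toList <+: T.drop ki then
          (if 0 ≤ VE E n (((ki : Nat) : Int) + (s.toList.length : Int)) then
            (if best < 0 ∨ VE E n (((ki : Nat) : Int) + (s.toList.length : Int)) + 1 < best then
              VE E n (((ki : Nat) : Int) + (s.toList.length : Int)) + 1
            else best)
          else best)
        else best)
      (-1 : Int) := by
    apply PySem.List.foldl_congr_mem
    intro b s hsmem
    have hs1 : 1 ≤ s.toList.length := List.length_pos_iff.mpr (h s hsmem)
    by_cases hpre : s.toList <+: T.drop ki
    · have hlenle : ki + s.toList.length ≤ T.length := by
        have := hpre.length_le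
        simp only [List.length_drop] at this
        by_cases hms : ki ≤ T.length
        · omega
        · exfalso
          have hnil : T.drop ki = [] := List.drop_eq_nil_of_le (by omega)
          rw [hnil] at hpre
          exact (h s hsmem) (List.prefix_nil.mp hpre)
      have hj : ((ki : Nat) : Int) + (s.toList.length : Int) = ((ki + s.toList.length : Nat) : Int) := by
        push_cast; ring
      have hslice : PySem.List.slice T (some ((ki : Nat) : Int))
          (some (((ki : Nat) : Int) + (s.toList.length : Int))) = s.toList := by
        rw [PySem.List.slice_toNat T (by positivity) (by positivity)]
        have ht1 : (((ki : Nat) : Int) + (s.toList.length : Int)).toNat = ki + s.toList.length := by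
          omega
        have ht2 : ((ki : Nat) : Int).toNat = ki := Int.toNat_natCast ki
        rw [ht1, ht2, show ki + s.toList.length - ki = s.toList.length from by omega]
        exact (List.prefix_iff_eq_take.mp hpre).symm
      have hget : PySem.List.pyGetD dp (((ki : Nat) : Int) + (s.toList.length : Int)) (-1)
          = VE E n (((ki : Nat) : Int) + (s.toList.length : Int)) := by
        rw [hj]
        exact hdp (ki + s.toList.length) (by omega) hlenle
      simp only [hpre, if_true, hget]
      refine if_congr ?_ rfl rfl
      constructor
      · rintro ⟨_, _, hv⟩; exact hv
      · intro hv
        exact ⟨by omega, hslice, hv⟩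
    · have hcond : ¬ ((((ki : Nat) : Int) + (s.toList.length : Int)) ≤ (T.length : Int) ∧
            PySem.List.slice T (some ((ki : Nat) : Int))
              (some (((ki : Nat) : Int) + (s.toList.length : Int))) = s.toList ∧
            0 ≤ PySem.List.pyGetD dp (((ki : Nat) : Int) + (s.toList.length : Int)) (-1)) := by
        rintro ⟨hjn, hsl, _⟩
        apply hpre
        rw [PySem.List.slice_toNat T (by positivity) (by positivity)] at hsl
        rw [Int.toNat_natCast] at hsl
        rw [← hsl]
        exact List.take_prefix _ _
      simp only [hpre, if_false, if_neg hcond]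
  rw [h1]
  have h2 := @List.foldl_filterMap String Int Int
      (fun s => if s.toList <+: T.drop ki
          then some (VE E n (((ki : Nat) : Int) + (s.toList.length : Int))) else none)
      (fun b v => if 0 ≤ v then (if b < 0 ∨ v + 1 < b then v + 1 else b) else b)
      strs (-1)
  have h2b : strs.foldl
      (fun best s =>
        if s.toList <+: T.drop ki then
          (if 0 ≤ VE E n (((ki : Nat) : Int) + (s.toList.length : Int)) then
            (if best < 0 ∨ VE E n (((ki : Nat) : Int) + (s.toList.length : Int)) + 1 < best then
              VE E n (((ki : Nat) : Int) + (s.toList.length : Int)) + 1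
            else best)
          else best)
        else best)
      (-1 : Int)
      = (strs.filterMap
          (fun s => if s.toList <+: T.drop ki
              then some (VE E n (((ki : Nat) : Int) + (s.toList.length : Int))) else none)).foldl
        (fun b v => if 0 ≤ v then (if b < 0 ∨ v + 1 < b then v + 1 else b) else b) (-1) := by
    rw [h2]
    apply PySem.List.foldl_congr_mem
    intro b s _
    by_cases hc : s.toList <+: T.drop ki
    · simp only [hc, if_true]
    · simp only [hc, if_false]
  rw [h2b]
  -- step 2: the candidate list is (E ki).map (VE E n)
  have h3 : strs.filterMap
      (fun s => if s.toList <+: T.drop ki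
          then some (VE E n (((ki : Nat) : Int) + (s.toList.length : Int))) else none)
      = (E ((ki : Nat) : Int)).map (VE E n) := by
    rw [hE, endsAll, List.filterMap_map, List.map_filterMap]
    apply List.filterMap_congr
    intro s _
    simp only [Function.comp_apply, Int.toNat_natCast]
    by_cases hc : s.toList <+: T.drop ki
    · simp [hc, Nat.cast_nonneg]
    · simp [hc]
  rw [h3]
  -- step 3: restrict to the nonnegative candidates
  have h4 : ((E ((ki : Nat) : Int)).map (VE E n)).foldl
      (fun b v => if 0 ≤ v then (if b < 0 ∨ v + 1 < b then v + 1 else b) else b) (-1)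
      = (((E ((ki : Nat) : Int)).map (VE E n)).filter (fun v => decide (0 ≤ v))).foldl
        (fun b v => if b < 0 ∨ v + 1 < b then v + 1 else b) (-1) := by
    rw [List.foldl_filter]
    apply PySem.List.foldl_congr_mem
    intro b v _
    by_cases h0 : 0 ≤ v
    · simp [h0]
    · simp [h0]
  have hEbounds : ∀ i e, e ∈ E i → i < e ∧ e ≤ n := by
    intro i e he
    exact endsAll_bounds (strs.map String.toList) T
      (by intro s hs; obtain ⟨u, hu, rfl⟩ := List.mem_map.mp hs; exact h u hu) i e he
  have h5 := bestFold_eq_min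
    (((E ((ki : Nat) : Int)).map (VE E n)).filter (fun v => decide (0 ≤ v)))
    (by intro v hv; simpa using (List.mem_filter.mp hv).2)
  -- step 4: unfold VE at ki one step
  have hne : ((ki : Nat) : Int) ≠ n := by rw [hn]; omega
  have hfl : (n - ((ki : Nat) : Int)).toNat + 1 = ((n - ((ki : Nat) : Int)).toNat - 1) + 1 + 1 := by
    rw [hn]; omega
  have hmapeq : (E ((ki : Nat) : Int)).map (loopE E n ((n - ((ki : Nat) : Int)).toNat - 1 + 1))
      = (E ((ki : Nat) : Int)).map (VE E n) := by
    apply List.map_congr_left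
    intro e hem
    obtain ⟨hlt, hle⟩ := hEbounds _ e hem
    exact loopE_fuel E n hEbounds _ _ e (by rw [hn] at *; omega) (by omega)
  conv_rhs => rw [VE, hfl]
  rw [show ∀ ff, loopE E n (ff + 1) ((ki : Nat) : Int)
      = if ((ki : Nat) : Int) = n then 0
        else
          match PySem.List.min?
              (((E ((ki : Nat) : Int)).map (loopE E n ff)).filter (fun c => decide (0 ≤ c)))
              (fun c => c) with
          | some m => 1 + m
          | none => -1
    from fun ff => rfl]
  rw [if_neg hne, hmapeq, ← h5, h4]

lemma pyRange_neg_snoc (a b : Int) (hb : b ≤ a) :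
    PySem.List.pyRange a (b - 1) (-1) = PySem.List.pyRange a b (-1) ++ [b] := by
  rw [PySem.List.pyRange_neg_one_eq_reverse, PySem.List.pyRange_neg_one_eq_reverse,
    show b - 1 + 1 = b from by omega,
    PySem.List.pyRange_one_cons (show b < a + 1 from by omega), List.reverse_cons]

lemma dpInv (strs : List String) (t : String) (h : ∀ s ∈ strs, s.toList ≠ []) :
    ∀ m : Nat, m ≤ t.toList.length →
      ((PySem.List.pyRange ((t.toList.length : Int) - 1)
          ((t.toList.length : Int) - 1 - (m : Int)) (-1)).foldl
        (bstep strs t.toList)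
        (PySem.List.pySetD (List.replicate (t.toList.length + 1) (-1 : Int))
          (t.toList.length : Int) 0)).length = t.toList.length + 1
      ∧ ∀ k : Nat, k ≤ t.toList.length →
          PySem.List.pyGetD
            ((PySem.List.pyRange ((t.toList.length : Int) - 1)
                ((t.toList.length : Int) - 1 - (m : Int)) (-1)).foldl
              (bstep strs t.toList)
              (PySem.List.pySetD (List.replicate (t.toList.length + 1) (-1 : Int))
                (t.toList.length : Int) 0))
            ((k : Nat) : Int) (-1)
          = if t.toList.length - m ≤ k
              then VE (endsAll (strs.map String.toList) t.toList) ((t.toList.length : Nat) : Int)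
                ((k : Nat) : Int)
              else -1 := by
  set T := t.toList with hT
  intro m
  induction m with
  | zero =>
    intro _
    have hnil : PySem.List.pyRange ((T.length : Int) - 1) ((T.length : Int) - 1 - (0 : Int)) (-1) = [] :=
      PySem.List.pyRange_neg_one_eq_nil (by omega)
    rw [show ((0 : Nat) : Int) = (0 : Int) from rfl, hnil, List.foldl_nil]
    constructor
    · rw [PySem.List.length_pySetD, List.length_replicate]
    · intro k hk
      have hget := PySem.List.pyGetD_pySetD_natCast (List.replicate (T.length + 1) (-1 : Int))
        T.length k (0 : Int) (-1) (by simp)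
      rw [hget]
      by_cases hkT : k = T.length
      · rw [if_pos hkT, if_pos (by omega)]
        subst hkT
        show (0 : Int) = loopE _ _ (((T.length : Int) - (T.length : Int)).toNat + 1) _
        rw [show ((T.length : Int) - (T.length : Int)).toNat + 1 = 0 + 1 from by omega]
        simp [loopE]
      · rw [if_neg hkT, if_neg (by omega)]
        rw [PySem.List.pyGetD_of_nonneg _ _ (by positivity), Int.toNat_natCast]
        exact List.getD_replicate _ (by omega)
  | succ m ih =>
    intro hm1
    have ihm := ih (by omega)
    obtain ⟨ihlen, ihget⟩ := ihm
    have hsnoc : PySem.List.pyRange ((T.length : Int) - 1) ((T.length : Int) - 1 - ((m + 1 : Nat) : Int)) (-1)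
        = PySem.List.pyRange ((T.length : Int) - 1) ((T.length : Int) - 1 - (m : Int)) (-1)
          ++ [(T.length : Int) - 1 - (m : Int)] := by
      rw [show (T.length : Int) - 1 - ((m + 1 : Nat) : Int) = ((T.length : Int) - 1 - (m : Int)) - 1 from by push_cast; ring]
      exact pyRange_neg_snoc _ _ (by omega)
    rw [hsnoc, List.foldl_append, List.foldl_cons, List.foldl_nil]
    set D := (PySem.List.pyRange ((T.length : Int) - 1) ((T.length : Int) - 1 - (m : Int)) (-1)).foldl
      (bstep strs T)
      (PySem.List.pySetD (List.replicate (T.length + 1) (-1 : Int)) (T.length : Int) 0) with hD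
    set ki : Nat := T.length - 1 - m with hki
    have hkiI : (T.length : Int) - 1 - (m : Int) = ((ki : Nat) : Int) := by omega
    have hbest : strs.foldl
        (fun best s =>
          let j : Int := ((ki : Nat) : Int) + (s.toList.length : Int)
          if j ≤ (T.length : Int) ∧ PySem.List.slice T (some ((ki : Nat) : Int)) (some j) = s.toList ∧
              0 ≤ PySem.List.pyGetD D j (-1) then
            if best < 0 ∨ PySem.List.pyGetD D j (-1) + 1 < best then
              PySem.List.pyGetD D j (-1) + 1
            else best
          else best)
        (-1 : Int)
        = VE (endsAll (strs.map String.toList) T) ((T.length : Nat) : Int) ((ki : Nat) : Int) := by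
      apply best_eq strs T h D ki (by omega)
      intro k hklt hkle
      rw [ihget k hkle, if_pos (by omega)]
    constructor
    · rw [bstep, hkiI, PySem.List.length_pySetD, ihlen]
    · intro k hk
      rw [bstep, hkiI, hbest]
      have hset := PySem.List.pyGetD_pySetD_natCast D ki k
        (VE (endsAll (strs.map String.toList) T) ((T.length : Nat) : Int) ((ki : Nat) : Int)) (-1)
        (by omega)
      rw [hset]
      by_cases hkki : k = ki
      · rw [if_pos hkki, if_pos (by omega)]
        subst hkki
        rfl
      · rw [if_neg hkki, ihget k hk]
        by_cases hcond : T.length - m ≤ k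
        · rw [if_pos hcond, if_pos (by omega)]
        · rw [if_neg hcond, if_neg (by omega)]

lemma solution_empty (strs : List String) : solution strs "" = 0 := by
  simp [solution, loopA, String.toList_empty]

lemma solution_alt_empty (strs : List String) : solution_alt strs "" = 0 := by
  rw [solution_alt]
  simp only [String.toList_empty, List.length_nil, Nat.cast_zero]
  rw [show (0 : Int) - 1 = -1 from by ring, PySem.List.pyRange_neg_one_eq_nil (by omega),
    List.foldl_nil]
  have hget := PySem.List.pyGetD_pySetD_natCast (List.replicate (0 + 1) (-1 : Int))
    0 0 (0 : Int) (-1) (by simp)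
  simpa using hget

lemma main_eq (strs : List String) (t : String) (h : ∀ s ∈ strs, s.toList ≠ []) :
    solution strs t = solution_alt strs t := by
  have hstrsL : ∀ s ∈ strs.map String.toList, s ≠ [] := by
    intro s hs
    obtain ⟨u, hu, rfl⟩ := List.mem_map.mp hs
    exact h u hu
  rw [solution, loopA_eq_loopE (strs.map String.toList) t.toList hstrsL, solution_alt_eq]
  have hinv := dpInv strs t h t.toList.length (le_refl _)
  obtain ⟨_, hget⟩ := hinv
  have hbound : (t.toList.length : Int) - 1 - ((t.toList.length : Nat) : Int) = -1 := by omega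
  rw [hbound] at hget
  have h0 := hget 0 (by omega)
  rw [if_pos (by omega)] at h0
  rw [show ((0 : Nat) : Int) = (0 : Int) from rfl] at h0
  rw [h0, VE]
  congr 1

lemma solution_agrees (strs : List String) (t : String) (hpre : "" ∈ strs → t = "") :
    solution strs t = solution_alt strs t := by
  by_cases he : "" ∈ strs
  · rw [hpre he, solution_empty, solution_alt_empty]
  · apply main_eq
    intro s hs hnil
    exact he (by rwa [String.toList_eq_nil_iff.mp hnil] at hs)

-- ===== VERDICT (by name: the statement is the Claim_ definition above) =====
theorem solution_spec : Claim_equal_solution := by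
  intro strs t _ hpre
  unfold Spec_solution
  exact solution_agrees strs t hpre
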